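-- pv_equiv track=rewrite | github.com/garfieldnate/scratch | format_germ_freq/separate_entries.py | separate_entries
-- ===== SOURCE A (Python) =====
-- def separate_entries(lines):
--     entries = []
--     # rule for looking for entries happens to not work on the first one,
--     # since '1' is both index and subentry marker
--     entry = lines[0:8]
--     expected_index = 2
--     for line in lines[9:]:
--         if line.lstrip().startswith(str(expected_index)):
--             entries.append(entry)
--             entry = [line]
--             expected_index += 1
--         else:
--             entry.append(line)
--     entries.append(entry)
--     return entries
-- ===== SOURCE B (Python) =====
-- def separate_entries(lines):
--     tail = lines[9:]
--     # first pass: record boundary positions (relative to tail) where the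
--     # expected index marker appears
--     bounds = []
--     expected_index = 2
--     for i, line in enumerate(tail):
--         if line.lstrip().startswith(str(expected_index)):
--             bounds.append(i)
--             expected_index += 1
--     # second pass: assemble entries by slicing
--     cuts = bounds + [len(tail)]
--     entries = [lines[0:8] + tail[0:cuts[0]]]
--     for j in range(len(bounds)):
--         entries.append(tail[cuts[j]:cuts[j + 1]])
--     return entries
-- ===== Notes on version B (the rewrite author's own statement) =====
-- stated objective: alternative
-- what changed: A grows each entry with a running accumulator inside one loop; B first scans the tail once recording boundary indices, then assembles the entries by slicing between consecutive boundaries.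
import Mathlib
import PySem

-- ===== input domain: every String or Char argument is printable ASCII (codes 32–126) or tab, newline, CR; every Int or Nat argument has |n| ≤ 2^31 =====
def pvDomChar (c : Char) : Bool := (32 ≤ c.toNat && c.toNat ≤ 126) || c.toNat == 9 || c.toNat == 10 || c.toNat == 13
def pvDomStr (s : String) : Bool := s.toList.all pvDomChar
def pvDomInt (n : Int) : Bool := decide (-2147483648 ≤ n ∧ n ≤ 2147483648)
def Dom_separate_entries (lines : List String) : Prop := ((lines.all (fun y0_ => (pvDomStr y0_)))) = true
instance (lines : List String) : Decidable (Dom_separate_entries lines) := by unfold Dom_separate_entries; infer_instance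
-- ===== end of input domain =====

-- B replaces A's running-accumulator loop by a two-phase decomposition: one pass
-- recording boundary indices, then assembly by slicing (objective: alternative).

-- ===== PORT A =====
def separate_entries (lines : List String) : List (List String) :=
  let entry := PySem.List.slice lines (some 0) (some 8)
  let st := (PySem.List.slice lines (some 9) none).foldl
    (fun (st : List (List String) × List String × Int) line =>
      if PySem.Str.startswith (PySem.Str.lstrip line) (PySem.Int.toStr st.2.2) then
        (st.1 ++ [st.2.1], ([line], st.2.2 + 1))
      else
        (st.1, (st.2.1 ++ [line], st.2.2)))
    ([], (entry, 2))
  st.1 ++ [st.2.1]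

-- ===== PORT B =====
def separate_entries_alt (lines : List String) : List (List String) :=
  let tail := PySem.List.slice lines (some 9) none
  let st := (PySem.List.enumerate tail).foldl
    (fun (st : List Int × Int) p =>
      if PySem.Str.startswith (PySem.Str.lstrip p.2) (PySem.Int.toStr st.2) then
        (st.1 ++ [p.1], st.2 + 1)
      else st)
    ([], 2)
  let bounds := st.1
  let cuts := bounds ++ [PySem.List.len tail]
  let entries := [PySem.List.slice lines (some 0) (some 8) ++
    PySem.List.slice tail (some 0) (some (PySem.List.pyGetD cuts 0 0))]
  (PySem.List.pyRange 0 (PySem.List.len bounds) 1).foldl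
    (fun acc j => acc ++ [PySem.List.slice tail (some (PySem.List.pyGetD cuts j 0))
      (some (PySem.List.pyGetD cuts (j + 1) 0))])
    entries

-- ===== PRECONDITION & SPEC =====
def Spec_separate_entries (lines : List String) (out : List (List String)) : Prop := out = separate_entries_alt lines
instance (lines : List String) (out : List (List String)) : Decidable (Spec_separate_entries lines out) := by unfold Spec_separate_entries; infer_instance

-- ===== CLAIM (what is proved, stated in full; the proofs are below) =====
def Claim_equal_separate_entries : Prop := ∀ (lines : List String), Dom_separate_entries lines → Spec_separate_entries lines (separate_entries lines)

-- ===== LEMMAS AND PROOFS =====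

/-- The boundary test both programs use. -/
def pvCond (line : String) (k : Int) : Bool :=
  PySem.Str.startswith (PySem.Str.lstrip line) (PySem.Int.toStr k)

/-- Reference grouping: what both programs compute on the tail. -/
def pvGroups (e : List String) (k : Int) : List String → List (List String)
  | [] => [e]
  | l :: t => if pvCond l k then e :: pvGroups [l] (k + 1) t else pvGroups (e ++ [l]) k t

lemma portA_loop (t : List String) (es : List (List String)) (e : List String) (k : Int) :
    (let st := t.foldl
      (fun (st : List (List String) × List String × Int) line =>
        if PySem.Str.startswith (PySem.Str.lstrip line) (PySem.Int.toStr st.2.2) then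
          (st.1 ++ [st.2.1], ([line], st.2.2 + 1))
        else
          (st.1, (st.2.1 ++ [line], st.2.2)))
      (es, (e, k))
    st.1 ++ [st.2.1]) = es ++ pvGroups e k t := by
  induction t generalizing es e k with
  | nil => simp [pvGroups]
  | cons l t ih =>
    simp only [List.foldl_cons, pvGroups, pvCond]
    by_cases h : PySem.Str.startswith (PySem.Str.lstrip l) (PySem.Int.toStr k)
    · simp only [h, if_true, ih, List.append_assoc, List.singleton_append]
    · simp only [h, if_false, ih, Bool.false_eq_true]

/-- Relative boundary positions of B's first pass. -/
def pvBounds (k : Int) : List String → List Int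
  | [] => []
  | l :: t => if pvCond l k then 0 :: (pvBounds (k + 1) t).map (· + 1)
              else (pvBounds k t).map (· + 1)

lemma pvBounds_nonneg (k : Int) (t : List String) : ∀ x ∈ pvBounds k t, 0 ≤ x := by
  induction t generalizing k with
  | nil => simp [pvBounds]
  | cons l t ih =>
    intro x hx
    simp only [pvBounds] at hx
    split at hx
    · rcases List.mem_cons.1 hx with rfl | h
      · omega
      · rcases List.mem_map.1 h with ⟨y, hy, rfl⟩
        have := ih _ _ hy; omega
    · rcases List.mem_map.1 hx with ⟨y, hy, rfl⟩
      have := ih _ _ hy; omega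

lemma portB_pass1 (t : List String) (bs : List Int) (i k : Int) :
    ((PySem.List.enumerate t i).foldl
      (fun (st : List Int × Int) p =>
        if PySem.Str.startswith (PySem.Str.lstrip p.2) (PySem.Int.toStr st.2) then
          (st.1 ++ [p.1], st.2 + 1)
        else st)
      (bs, k)).1 = bs ++ (pvBounds k t).map (· + i) := by
  induction t generalizing bs i k with
  | nil => simp [pvBounds, PySem.List.enumerate_nil]
  | cons l t ih =>
    rw [PySem.List.enumerate_cons]
    simp only [List.foldl_cons, pvBounds, pvCond]
    by_cases h : PySem.Str.startswith (PySem.Str.lstrip l) (PySem.Int.toStr k)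
    · simp only [h, if_true, ih, List.map_cons, List.map_map, List.append_assoc,
        List.singleton_append, zero_add]
      congr 2
      exact List.map_congr_left (fun x _ => by simp only [Function.comp_apply]; omega)
    · simp only [h, Bool.false_eq_true, if_false, ih, List.map_map]
      congr 1
      exact List.map_congr_left (fun x _ => by simp only [Function.comp_apply]; omega)

/-- Nat-indexed form of B's assembly phase. -/
def pvAsm (e : List String) (t : List String) (bs : List Int) : List (List String) :=
  let cuts := bs ++ [(t.length : Int)]
  (e ++ PySem.List.slice t (some 0) (some (cuts.getD 0 0))) ::
    (List.range bs.length).map (fun j =>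
      PySem.List.slice t (some (cuts.getD j 0)) (some (cuts.getD (j + 1) 0)))

lemma getD_nonneg {xs : List Int} (h : ∀ x ∈ xs, 0 ≤ x) (j : ℕ) : 0 ≤ xs.getD j 0 := by
  rcases lt_or_ge j xs.length with hj | hj
  · rw [List.getD_eq_getElem _ _ hj]; exact h _ (List.getElem_mem hj)
  · rw [List.getD_eq_default _ _ hj]

lemma getD_map_succ (xs : List Int) (j : ℕ) (hj : j < xs.length) :
    (xs.map (· + 1)).getD j 0 = xs.getD j 0 + 1 := by
  rw [List.getD_eq_getElem _ _ (by simpa using hj), List.getD_eq_getElem _ _ hj]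
  simp

lemma slice_cons_succ (l : String) (t : List String) (a b : Int) (ha : 0 ≤ a) (hb : 0 ≤ b) :
    PySem.List.slice (l :: t) (some (a + 1)) (some (b + 1)) =
    PySem.List.slice t (some a) (some b) := by
  rw [PySem.List.slice_toNat _ (by omega) (by omega), PySem.List.slice_toNat _ ha hb]
  have h1 : (a + 1).toNat = a.toNat + 1 := by omega
  have h2 : (b + 1).toNat = b.toNat + 1 := by omega
  simp [h1, h2]

lemma slice_zero_cons_succ (l : String) (t : List String) (b : Int) (hb : 0 ≤ b) :
    PySem.List.slice (l :: t) (some 0) (some (b + 1)) =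
    l :: PySem.List.slice t (some 0) (some b) := by
  rw [PySem.List.slice_toNat _ (by omega) (by omega), PySem.List.slice_toNat _ le_rfl hb]
  have h2 : (b + 1).toNat = b.toNat + 1 := by omega
  simp [h2]

lemma slice_zero_zero (t : List String) : PySem.List.slice t (some 0) (some 0) = [] := by
  rw [PySem.List.slice_toNat _ le_rfl le_rfl]
  simp

lemma pvAsm_groups (t : List String) (e : List String) (k : Int) :
    pvAsm e t (pvBounds k t) = pvGroups e k t := by
  induction t generalizing e k with
  | nil => simp [pvAsm, pvGroups, pvBounds,
      show PySem.List.slice ([] : List String) none (some 0) = [] from rfl]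
  | cons l t ih =>
    have hnn : ∀ x ∈ pvBounds (k + 1) t ++ [(t.length : Int)], 0 ≤ x := by
      intro x hx
      rcases List.mem_append.1 hx with h | h
      · exact pvBounds_nonneg _ _ _ h
      · rcases List.mem_singleton.1 h with rfl
        exact Int.natCast_nonneg _
    have hnn' : ∀ x ∈ pvBounds k t ++ [(t.length : Int)], 0 ≤ x := by
      intro x hx
      rcases List.mem_append.1 hx with h | h
      · exact pvBounds_nonneg _ _ _ h
      · rcases List.mem_singleton.1 h with rfl
        exact Int.natCast_nonneg _
    simp only [pvGroups, pvBounds]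
    by_cases h : pvCond l k
    · simp only [h, if_true]
      rw [← ih [l] (k + 1)]
      simp only [pvAsm]
      have hcuts : (0 :: (pvBounds (k + 1) t).map (· + 1)) ++ [((l :: t).length : Int)] =
          0 :: ((pvBounds (k + 1) t) ++ [(t.length : Int)]).map (· + 1) := by
        simp
      rw [hcuts]
      set cuts' := pvBounds (k + 1) t ++ [(t.length : Int)] with hc
      congr 1
      · -- head entry of the outer list: e ++ slice t 0 0 = [ ... ] head is e itself
        simp only [List.getD_cons_zero, slice_zero_zero, List.append_nil]
      · simp only [List.length_cons, List.range_succ_eq_map, List.map_cons, List.map_map,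
          List.length_map]
        congr 1
        · -- j = 0 term
          simp only [List.getD_cons_zero, List.getD_cons_succ]
          rw [getD_map_succ _ 0 (by simp [hc]),
              slice_zero_cons_succ _ _ _ (getD_nonneg hnn 0)]
          simp only [List.singleton_append]
        · -- j ≥ 1 terms
          apply List.map_congr_left
          intro j hj
          have hjl : j < (pvBounds (k + 1) t).length := List.mem_range.1 hj
          simp only [Function.comp_apply, Nat.succ_eq_add_one, List.getD_cons_succ]
          rw [getD_map_succ _ j (by simp [hc]; omega), getD_map_succ _ (j + 1) (by simp [hc]; omega),
              slice_cons_succ _ _ _ _ (getD_nonneg hnn j) (getD_nonneg hnn (j + 1))]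
    · simp only [h, Bool.false_eq_true, if_false]
      rw [← ih (e ++ [l]) k]
      simp only [pvAsm]
      have hcuts : ((pvBounds k t).map (· + 1)) ++ [((l :: t).length : Int)] =
          ((pvBounds k t) ++ [(t.length : Int)]).map (· + 1) := by
        simp
      rw [hcuts]
      set cuts' := pvBounds k t ++ [(t.length : Int)] with hc
      congr 1
      · -- head entry
        rw [getD_map_succ _ 0 (by simp [hc]),
            slice_zero_cons_succ _ _ _ (getD_nonneg hnn' 0)]
        simp
      · -- remaining entries
        simp only [List.length_map]
        apply List.map_congr_left
        intro j hj
        have hjl : j < (pvBounds k t).length := List.mem_range.1 hj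
        rw [getD_map_succ _ j (by simp [hc]; omega), getD_map_succ _ (j + 1) (by simp [hc]; omega),
            slice_cons_succ _ _ _ _ (getD_nonneg hnn' j) (getD_nonneg hnn' (j + 1))]

lemma portB_eq_asm (lines : List String) :
    separate_entries_alt lines =
      pvAsm (PySem.List.slice lines (some 0) (some 8))
        (PySem.List.slice lines (some 9) none)
        (pvBounds 2 (PySem.List.slice lines (some 9) none)) := by
  unfold separate_entries_alt
  set t := PySem.List.slice lines (some 9) none with ht
  have hmap : (pvBounds 2 t).map (· + (0 : Int)) = pvBounds 2 t := by simp
  have h1 := portB_pass1 t [] 0 2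
  rw [hmap] at h1
  simp only [List.nil_append] at h1
  simp only [h1, PySem.List.len_eq, PySem.List.foldl_append_singleton_eq_map,
    PySem.List.pyRange_zero_natCast, List.map_map, PySem.List.pyGetD_zero, pvAsm]
  simp only [List.singleton_append]
  congr 1
  apply List.map_congr_left
  intro j hj
  simp only [Function.comp_apply, PySem.List.pyGetD_natCast]
  have hj1 : ((j : Int) + 1) = ((j + 1 : ℕ) : Int) := by push_cast; ring
  rw [hj1, PySem.List.pyGetD_natCast]

-- ===== VERDICT (by name: the statement is the Claim_ definition above) =====
theorem separate_entries_spec : Claim_equal_separate_entries := by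
  intro lines _
  unfold Spec_separate_entries
  rw [portB_eq_asm, pvAsm_groups]
  unfold separate_entries
  have h := portA_loop (PySem.List.slice lines (some 9) none) []
    (PySem.List.slice lines (some 0) (some 8)) 2
  simpa using h
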